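-- pv_equiv track=rewrite | github.com/rishabhsahlot/Decision-Tree-Adagrad-from-scratch-for-language-classification | features.py | longest_consonant_streak
-- ===== SOURCE A (Python) =====
-- def longest_consonant_streak(words):
--     ans = 0
--     for word in words:
--         i = 0
--         while i < len(word):
--             j = i
--             while j < len(word) and word[j] not in ['a', 'e', 'i', 'o', 'u', 'A', 'E', 'I', 'O', 'U']:
--                 j += 1
--             ans = max(ans, j - i)
--             i = j + 1
--     return ans
-- ===== SOURCE B (Python) =====
-- def longest_consonant_streak(words):
--     ans = 0
--     for word in words:
--         cur = 0
--         for ch in word: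
--             cur = 0 if ch in 'aeiouAEIOU' else cur + 1
--             ans = max(ans, cur)
--     return ans
-- ===== Notes on version B (the rewrite author's own statement) =====
-- stated objective: simpler
-- what changed: Replaces A's two-pointer run extraction (nested while loops over indices) with a single pass per word keeping a running consonant counter reset on vowels.
import Mathlib
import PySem

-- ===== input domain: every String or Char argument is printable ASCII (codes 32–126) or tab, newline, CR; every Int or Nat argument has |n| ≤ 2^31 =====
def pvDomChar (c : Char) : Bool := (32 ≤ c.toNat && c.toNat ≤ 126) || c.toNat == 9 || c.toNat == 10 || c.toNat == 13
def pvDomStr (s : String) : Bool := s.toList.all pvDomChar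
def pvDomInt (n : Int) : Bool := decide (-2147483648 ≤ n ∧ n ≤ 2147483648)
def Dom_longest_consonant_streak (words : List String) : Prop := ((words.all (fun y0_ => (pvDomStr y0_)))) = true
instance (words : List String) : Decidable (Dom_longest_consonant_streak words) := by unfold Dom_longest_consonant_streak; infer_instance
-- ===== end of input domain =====

-- B replaces A's two-pointer run extraction with a running consonant counter per word (simpler decomposition).


-- ===== PORT A =====
-- word[j] not in ['a',…,'U']
def pvIsVowel (c : Char) : Bool :=
  c == 'a' || c == 'e' || c == 'i' || c == 'o' || c == 'u' ||
  c == 'A' || c == 'E' || c == 'I' || c == 'O' || c == 'U'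

-- inner while: number of steps j advances from i while chars are non-vowels (j - i)
def pvRunA : List Char → Nat
  | [] => 0
  | c :: t => if pvIsVowel c then 0 else pvRunA t + 1

-- outer while over i, expressed on the suffix word[i:]; each iteration computes j - i = pvRunA,
-- updates ans = max ans (j - i), and continues at i = j + 1 (suffix dropped by run + 1)
def pvLoopA (cs : List Char) (ans : Int) : Int :=
  match cs with
  | [] => ans
  | c :: t =>
      let k := pvRunA (c :: t)
      pvLoopA ((c :: t).drop (k + 1)) (max ans (k : Int))
termination_by cs.length
decreasing_by simp [List.length_drop]

def longest_consonant_streak (words : List String) : Int :=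
  words.foldl (fun ans word => pvLoopA word.toList ans) 0

-- ===== PORT B =====
-- one step of B's inner loop: update (cur, ans)
def pvStepB (p : Int × Int) (c : Char) : Int × Int :=
  let cur := if pvIsVowel c then 0 else p.1 + 1
  (cur, max p.2 cur)

def longest_consonant_streak_alt (words : List String) : Int :=
  words.foldl (fun ans word => (word.toList.foldl pvStepB (0, ans)).2) 0

-- ===== PRECONDITION & SPEC =====
def Spec_longest_consonant_streak (words : List String) (out : Int) : Prop := out = longest_consonant_streak_alt words
instance (words : List String) (out : Int) : Decidable (Spec_longest_consonant_streak words out) := by unfold Spec_longest_consonant_streak; infer_instance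

-- ===== CLAIM (what is proved, stated in full; the proofs are below) =====
def Claim_equal_longest_consonant_streak : Prop := ∀ (words : List String), Dom_longest_consonant_streak words → Spec_longest_consonant_streak words (longest_consonant_streak words)

-- ===== LEMMAS AND PROOFS =====

theorem pvLoopA_nil (ans : Int) : pvLoopA [] ans = ans := by
  rw [pvLoopA.eq_def]

theorem pvLoopA_cons (c : Char) (t : List Char) (ans : Int) :
    pvLoopA (c :: t) ans
      = pvLoopA ((c :: t).drop (pvRunA (c :: t) + 1)) (max ans (pvRunA (c :: t) : Int)) := by
  rw [pvLoopA.eq_def]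

theorem pvLoopA_max : ∀ (n : Nat) (cs : List Char), cs.length ≤ n → ∀ ans : Int, 0 ≤ ans →
    pvLoopA cs ans = max ans (pvLoopA cs 0) := by
  intro n
  induction n with
  | zero =>
      intro cs hlen ans h
      have : cs = [] := List.eq_nil_of_length_eq_zero (Nat.le_zero.mp hlen)
      subst this; rw [pvLoopA_nil, pvLoopA_nil]; omega
  | succ n ih =>
      intro cs hlen ans h
      match cs with
      | [] => rw [pvLoopA_nil, pvLoopA_nil]; omega
      | c :: t =>
          set k := pvRunA (c :: t) with hk
          have hd : ((c :: t).drop (k + 1)).length ≤ n := by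
            simp only [List.length_drop, List.length_cons]
            simp only [List.length_cons] at hlen; omega
          rw [pvLoopA_cons, pvLoopA_cons,
            ih _ hd (max ans (k : Int)) (by positivity),
            ih _ hd (max 0 (k : Int)) (by positivity)]
          have : (0 : Int) ≤ (k : Int) := Int.natCast_nonneg _
          omega

theorem pvLoopA_cons_eq (cs : List Char) :
    pvLoopA cs 0 = max (pvRunA cs : Int) (pvLoopA (cs.drop (pvRunA cs + 1)) 0) := by
  match cs with
  | [] => simp [pvLoopA_nil, pvRunA]
  | c :: t =>
      rw [pvLoopA_cons,
        pvLoopA_max ((c :: t).drop (pvRunA (c :: t) + 1)).length _ le_rfl _ (by positivity)]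
      have : (0 : Int) ≤ (pvRunA (c :: t) : Int) := Int.natCast_nonneg _
      omega

theorem pvLoopA_nonneg (cs : List Char) (ans : Int) (h : 0 ≤ ans) : 0 ≤ pvLoopA cs ans := by
  rw [pvLoopA_max cs.length cs le_rfl ans h]
  omega

theorem pvFoldB_eq (cs : List Char) : ∀ (cur ans : Int), 0 ≤ cur → cur ≤ ans →
    (cs.foldl pvStepB (cur, ans)).2
      = max ans (max (cur + (pvRunA cs : Int)) (pvLoopA (cs.drop (pvRunA cs + 1)) 0)) := by
  induction cs with
  | nil =>
      intro cur ans h0 h1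
      simp only [List.foldl_nil, pvRunA, Nat.cast_zero, List.drop_nil, pvLoopA_nil]
      omega
  | cons c t ih =>
      intro cur ans h0 h1
      by_cases hv : pvIsVowel c = true
      · have hstep : pvStepB (cur, ans) c = (0, max ans 0) := by
          simp [pvStepB, hv]
        rw [List.foldl_cons, hstep, ih 0 (max ans 0) le_rfl (le_max_right _ _)]
        have h2 : pvRunA (c :: t) = 0 := by simp [pvRunA, hv]
        rw [h2]
        simp only [zero_add, Nat.cast_zero, List.drop_succ_cons, List.drop_zero]
        rw [pvLoopA_cons_eq t]
        have : (0 : Int) ≤ (pvRunA t : Int) := Int.natCast_nonneg _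
        have hnn := pvLoopA_nonneg (t.drop (pvRunA t + 1)) 0 le_rfl
        omega
      · have hstep : pvStepB (cur, ans) c = (cur + 1, max ans (cur + 1)) := by
          simp [pvStepB, hv]
        rw [List.foldl_cons, hstep,
          ih (cur + 1) (max ans (cur + 1)) (by omega) (le_max_right _ _)]
        have h2 : pvRunA (c :: t) = pvRunA t + 1 := by simp [pvRunA, hv]
        rw [h2]
        have h3 : (c :: t).drop (pvRunA t + 1 + 1) = t.drop (pvRunA t + 1) := by
          simp [List.drop_succ_cons]
        rw [h3]
        have h4 : (0 : Int) ≤ (pvRunA t : Int) := Int.natCast_nonneg _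
        push_cast
        omega

theorem pvWord_eq (cs : List Char) (ans : Int) (h : 0 ≤ ans) :
    (cs.foldl pvStepB (0, ans)).2 = pvLoopA cs ans := by
  rw [pvFoldB_eq cs 0 ans le_rfl h, pvLoopA_max cs.length cs le_rfl ans h, pvLoopA_cons_eq cs]
  omega

theorem pvFold_words (words : List String) : ∀ ans : Int, 0 ≤ ans →
    words.foldl (fun ans word => pvLoopA word.toList ans) ans
      = words.foldl (fun ans word => (word.toList.foldl pvStepB (0, ans)).2) ans := by
  induction words with
  | nil => intro ans _; rfl
  | cons w ws ih =>
      intro ans h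
      simp only [List.foldl_cons]
      rw [pvWord_eq w.toList ans h, ih _ (pvLoopA_nonneg _ _ h)]

-- ===== VERDICT (by name: the statement is the Claim_ definition above) =====
theorem longest_consonant_streak_spec : Claim_equal_longest_consonant_streak := by
  intro words _
  show longest_consonant_streak words = longest_consonant_streak_alt words
  exact pvFold_words words 0 le_rfl
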